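-- pv_equiv track=rewrite | github.com/StevenXoFk/Tarea-taller-Tkinter | convertidor.py | base7_a_base8
-- ===== SOURCE A (Python) =====
-- def base7_a_base8(numero):
--     decimal = 0
--     exponente = 0
--
--     while numero > 0:
--         digitos = numero % 10
--         decimal += digitos * (7 ** exponente)
--         numero //= 10
--         exponente += 1
--
--     binario = 0
--     valor = 1
--     while decimal > 0:
--         todo = decimal % 8
--         binario += todo * valor
--         decimal //= 8
--         valor *= 10
--
--     return binario
-- ===== SOURCE B (Python) =====
-- def base7_a_base8(numero):
--     # Recursive Horner evaluation: most-significant digit first, no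
--     # explicit exponent/place-value accumulators.
--     def to_dec(n):
--         return to_dec(n // 10) * 7 + n % 10 if n > 0 else 0
--
--     def to_oct(n):
--         return to_oct(n // 8) * 10 + n % 8 if n > 0 else 0
--
--     return to_oct(to_dec(numero))
-- ===== Notes on version B (the rewrite author's own statement) =====
-- stated objective: alternative
-- what changed: Replaces A's two accumulator loops (explicit 7**exponente weight and valor*=10 place value) with nested recursive Horner evaluations that carry no exponent/place-value state.
import Mathlib
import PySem

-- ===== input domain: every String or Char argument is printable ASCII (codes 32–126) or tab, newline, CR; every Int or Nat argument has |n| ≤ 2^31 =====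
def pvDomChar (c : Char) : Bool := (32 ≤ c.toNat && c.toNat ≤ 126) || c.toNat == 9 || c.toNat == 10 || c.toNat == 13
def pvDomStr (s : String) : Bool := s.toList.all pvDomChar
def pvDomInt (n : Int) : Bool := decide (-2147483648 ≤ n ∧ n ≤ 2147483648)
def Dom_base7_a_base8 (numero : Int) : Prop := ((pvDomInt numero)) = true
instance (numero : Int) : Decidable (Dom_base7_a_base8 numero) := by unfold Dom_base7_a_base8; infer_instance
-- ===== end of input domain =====

-- B replaces A's two accumulator loops (explicit power/place-value state) with
-- nested recursive Horner evaluations; alternative decomposition, same cost.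
-- (Loops are fueled for totality; fuel n.toNat always suffices since n shrinks each step.)

-- ===== PORT A =====
-- first while-loop of A: accumulates `decimal` with an explicit 7**exponente weight
def pvLoop1A : Nat → Int → Int → Nat → Int
  | 0, _, decimal, _ => decimal
  | fuel + 1, numero, decimal, exponente =>
    if numero > 0 then
      pvLoop1A fuel (PySem.Int.floordiv numero 10)
        (decimal + PySem.Int.mod numero 10 * 7 ^ exponente) (exponente + 1)
    else decimal

-- second while-loop of A: packs base-8 digits with the `valor *= 10` place value
def pvLoop2A : Nat → Int → Int → Int → Int
  | 0, _, binario, _ => binario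
  | fuel + 1, decimal, binario, valor =>
    if decimal > 0 then
      pvLoop2A fuel (PySem.Int.floordiv decimal 8)
        (binario + PySem.Int.mod decimal 8 * valor) (valor * 10)
    else binario

def base7_a_base8 (numero : Int) : Int :=
  pvLoop2A (pvLoop1A numero.toNat numero 0 0).toNat (pvLoop1A numero.toNat numero 0 0) 0 1

-- ===== PORT B =====
-- recursive Horner evaluation, most-significant digit first (Source B's to_dec)
def pvToDec : Nat → Int → Int
  | 0, _ => 0
  | fuel + 1, n =>
    if n > 0 then pvToDec fuel (PySem.Int.floordiv n 10) * 7 + PySem.Int.mod n 10 else 0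

-- recursive Horner packing of octal digits (Source B's to_oct)
def pvToOct : Nat → Int → Int
  | 0, _ => 0
  | fuel + 1, n =>
    if n > 0 then pvToOct fuel (PySem.Int.floordiv n 8) * 10 + PySem.Int.mod n 8 else 0

def base7_a_base8_alt (numero : Int) : Int :=
  pvToOct (pvToDec numero.toNat numero).toNat (pvToDec numero.toNat numero)

-- ===== PRECONDITION & SPEC =====
def Spec_base7_a_base8 (numero : Int) (out : Int) : Prop := out = base7_a_base8_alt numero
instance (numero : Int) (out : Int) : Decidable (Spec_base7_a_base8 numero out) := by unfold Spec_base7_a_base8; infer_instance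

-- ===== CLAIM (what is proved, stated in full; the proofs are below) =====
def Claim_equal_base7_a_base8 : Prop := ∀ (numero : Int), Dom_base7_a_base8 numero → Spec_base7_a_base8 numero (base7_a_base8 numero)

-- ===== LEMMAS AND PROOFS =====

lemma pvLoop1A_eq (fuel : Nat) : ∀ (n dec : Int) (e : Nat), n.toNat ≤ fuel →
    pvLoop1A fuel n dec e = dec + pvToDec fuel n * 7 ^ e := by
  induction fuel with
  | zero => intro n dec e _; simp [pvLoop1A, pvToDec]
  | succ f ih =>
    intro n dec e hle
    by_cases h : n > 0
    · have hdiv : (PySem.Int.floordiv n 10).toNat ≤ f := by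
        rw [PySem.Int.floordiv_eq_ediv_of_pos (by omega)]; omega
      rw [pvLoop1A, pvToDec, if_pos h, if_pos h, ih _ _ _ hdiv]; ring
    · rw [pvLoop1A, pvToDec, if_neg h, if_neg h]; ring

lemma pvLoop2A_eq (fuel : Nat) : ∀ (d bin val : Int), d.toNat ≤ fuel →
    pvLoop2A fuel d bin val = bin + pvToOct fuel d * val := by
  induction fuel with
  | zero => intro d bin val _; simp [pvLoop2A, pvToOct]
  | succ f ih =>
    intro d bin val hle
    by_cases h : d > 0
    · have hdiv : (PySem.Int.floordiv d 8).toNat ≤ f := by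
        rw [PySem.Int.floordiv_eq_ediv_of_pos (by omega)]; omega
      rw [pvLoop2A, pvToOct, if_pos h, if_pos h, ih _ _ _ hdiv]; ring
    · rw [pvLoop2A, pvToOct, if_neg h, if_neg h]; ring

-- ===== VERDICT (by name: the statement is the Claim_ definition above) =====
theorem base7_a_base8_spec : Claim_equal_base7_a_base8 := by
  intro numero _
  unfold Spec_base7_a_base8 base7_a_base8 base7_a_base8_alt
  have h1 : pvLoop1A numero.toNat numero 0 0 = pvToDec numero.toNat numero := by
    rw [pvLoop1A_eq _ _ _ _ le_rfl]; ring
  rw [h1, pvLoop2A_eq _ _ _ _ le_rfl]; ring
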